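-- pv_equiv track=rewrite | github.com/robertschaedler3/Course-Work | CS 115 (Intro to Computer Science)/hw2_scrabble_no_recursion.py | scoreList
-- ===== SOURCE A (Python) =====
-- scrabbleScores = [['a', 1], ['b', 3], ['c', 3], ['d', 2], ['e', 1], ['f', 4], ['g', 2], ['h', 4], ['i', 1], ['j', 8], ['k', 5], ['l', 1], [
--     'm', 3], ['n', 1], ['o', 1], ['p', 3], ['q', 10], ['r', 1], ['s', 1], ['t', 1], ['u', 1], ['v', 4], ['w', 4], ['x', 8], ['y', 4], ['z', 10]]
--
-- Dictionary = ['a', 'am', 'at', 'apple', 'bat', 'bar',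
--               'babble', 'can', 'foo', 'spam', 'spammy', 'zzyzva']
--
-- def remove_list_element(e, l):
--     """Removes element e from list l and returns the new list."""
--     i = l.index(e)
--     l = l[:i] + l[i + 1:]
--     return l
--
-- def letterScore(letter, scorelist):
--     """Takes a letter and a score list and returns the score for that letter. None is returned if the letter does not exist in the score list."""
--     for l, score in scorelist:
--         if l == letter:
--             return score
--     else:
--         return None
--
-- def wordScore(word, scorelist):
--     """Takes a word and a score list and returns the score of the word."""
--     total = 0
--     for l in word:
--         total += letterScore(l, scorelist)
--     return total
--
-- def scoreList(Rack):
--     """Takes a rack and returns all the possible scores that can be made."""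
--     scores = []
--     for word in Dictionary:
--         rack = Rack
--         for letter in word:
--             if letter in rack:
--                 rack = remove_list_element(letter, rack)
--             else:
--                 break
--         else:
--             scores.append([word, wordScore(word, scrabbleScores)])
--     return scores
-- ===== SOURCE B (Python) =====
-- scrabbleScores = [['a', 1], ['b', 3], ['c', 3], ['d', 2], ['e', 1], ['f', 4], ['g', 2], ['h', 4], ['i', 1], ['j', 8], ['k', 5], ['l', 1], [
--     'm', 3], ['n', 1], ['o', 1], ['p', 3], ['q', 10], ['r', 1], ['s', 1], ['t', 1], ['u', 1], ['v', 4], ['w', 4], ['x', 8], ['y', 4], ['z', 10]]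
--
-- Dictionary = ['a', 'am', 'at', 'apple', 'bat', 'bar',
--               'babble', 'can', 'foo', 'spam', 'spammy', 'zzyzva']
--
--
-- def _counts(items):
--     """Frequency table of the items."""
--     c = {}
--     for x in items:
--         c[x] = c.get(x, 0) + 1
--     return c
--
--
-- def scoreList(Rack):
--     """Takes a rack and returns all the possible scores that can be made."""
--     rack_count = _counts(Rack)
--     points = dict(scrabbleScores)
--     scores = []
--     for word in Dictionary:
--         need = _counts(word)
--         if all(rack_count.get(ch, 0) >= n for ch, n in need.items()):
--             scores.append([word, sum(points[ch] for ch in word)])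
--     return scores
-- ===== Notes on version B (the rewrite author's own statement) =====
-- stated objective: faster
-- what changed: Replaces A's per-letter membership-test-and-remove rack simulation (with slicing rack rebuilds and for/else break detection) by one frequency table of the rack built once and compared against each word's frequency table, and replaces the linear letterScore scan with a points dict built once.
import Mathlib
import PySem

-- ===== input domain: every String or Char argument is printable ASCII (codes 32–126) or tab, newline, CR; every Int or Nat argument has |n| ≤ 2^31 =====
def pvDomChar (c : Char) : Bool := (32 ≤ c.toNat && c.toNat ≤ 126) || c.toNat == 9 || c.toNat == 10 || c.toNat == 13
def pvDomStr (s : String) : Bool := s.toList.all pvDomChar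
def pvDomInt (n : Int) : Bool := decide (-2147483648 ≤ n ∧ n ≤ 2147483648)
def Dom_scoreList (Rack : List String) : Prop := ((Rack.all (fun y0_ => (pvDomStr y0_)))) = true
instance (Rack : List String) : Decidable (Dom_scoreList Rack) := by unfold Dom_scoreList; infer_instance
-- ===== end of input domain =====

-- B replaces A's per-letter membership-test-and-remove rack simulation (slicing rebuilds, for/else)
-- by one frequency table of the rack compared against each word's frequency table; same results.

def scrabbleScores : List (String × Int) := [("a", 1), ("b", 3), ("c", 3), ("d", 2), ("e", 1), ("f", 4), ("g", 2), ("h", 4), ("i", 1), ("j", 8), ("k", 5), ("l", 1), ("m", 3), ("n", 1), ("o", 1), ("p", 3), ("q", 10), ("r", 1), ("s", 1), ("t", 1), ("u", 1), ("v", 4), ("w", 4), ("x", 8), ("y", 4), ("z", 10)]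

def Dictionary : List String := ["a", "am", "at", "apple", "bat", "bar", "babble", "can", "foo", "spam", "spammy", "zzyzva"]

-- ===== PORT A =====
-- remove_list_element: l.index(e) is guarded by 'letter in rack' at A's only call site, so index? is always some
def removeListElement (e : String) (l : List String) : List String :=
  match PySem.List.index? l e with
  | some i => PySem.List.slice l (some 0) (some (i : Int)) ++ PySem.List.slice l (some ((i : Int) + 1)) none
  | none => l  -- Python would raise ValueError; unreachable at A's call site

def letterScore (letter : String) : List (String × Int) → Option Int
  | [] => none
  | (l, score) :: rest => if l == letter then some score else letterScore letter rest

-- total += letterScore(...): None would raise TypeError; never occurs for Dictionary words (all a–z)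
def wordScore (word : String) (scorelist : List (String × Int)) : Int :=
  word.toList.foldl (fun total l => total + (letterScore (String.ofList [l]) scorelist).getD 0) 0

-- A's inner 'for letter in word: … else: …' loop (true = the for/else 'else' branch is reached)
def buildLoop : List Char → List String → Bool
  | [], _ => true
  | c :: rest, rack =>
    if String.ofList [c] ∈ rack then buildLoop rest (removeListElement (String.ofList [c]) rack)
    else false

def scoreList (Rack : List String) : List (String × Int) :=
  Dictionary.foldl (fun scores word =>
    if buildLoop word.toList Rack then scores ++ [(word, wordScore word scrabbleScores)]
    else scores) []

-- ===== PORT B =====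
-- _counts helper of Source B
def pvCounts (xs : List String) : PySem.Dict String Int :=
  xs.foldl (fun c x => c.insert x (c.getD x 0 + 1)) PySem.Dict.empty

-- points[ch] would raise KeyError on a missing key; never occurs for Dictionary words (all a–z)
def scoreList_alt (Rack : List String) : List (String × Int) :=
  let rackCount := pvCounts Rack
  let points := PySem.Dict.ofList scrabbleScores
  Dictionary.foldl (fun scores word =>
    let chars := word.toList.map (fun c => String.ofList [c])
    if (pvCounts chars).items.all (fun p => rackCount.getD p.1 0 ≥ p.2) then
      scores ++ [(word, (chars.map (fun s => points.getD s 0)).sum)]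
    else scores) []

-- ===== PRECONDITION & SPEC =====
def Spec_scoreList (Rack : List String) (out : List (String × Int)) : Prop := out = scoreList_alt Rack
instance (Rack : List String) (out : List (String × Int)) : Decidable (Spec_scoreList Rack out) := by unfold Spec_scoreList; infer_instance

-- ===== CLAIM (what is proved, stated in full; the proofs are below) =====
def Claim_equal_scoreList : Prop := ∀ (Rack : List String), Dom_scoreList Rack → Spec_scoreList Rack (scoreList Rack)

-- ===== LEMMAS AND PROOFS =====

lemma removeListElement_eq_erase (e : String) (l : List String) (h : e ∈ l) :
    removeListElement e l = l.erase e := by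
  unfold removeListElement
  cases hi : PySem.List.index? l e with
  | none => rw [PySem.List.index?_eq_none_iff] at hi; exact absurd h hi
  | some i =>
    have hio : List.idxOf? e l = some i := by
      have := PySem.List.index?_eq_idxOf? (xs := l) (v := e); rw [this] at hi; exact hi
    rw [List.erase_eq_eraseIdx, hio]
    show PySem.List.slice l (some 0) (some (i : Int)) ++ PySem.List.slice l (some ((i : Int) + 1)) none = l.eraseIdx i
    rw [PySem.List.slice_from (xs := l) (a := (i:Int)+1) (by omega)]
    simp [PySem.List.slice_to_natCast, List.eraseIdx_eq_take_drop_succ]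

lemma buildLoop_iff (letters : List Char) (rack : List String) :
    buildLoop letters rack = true ↔
      ∀ c, letters.count c ≤ rack.count (String.ofList [c]) := by
  induction letters generalizing rack with
  | nil => simp [buildLoop]
  | cons c rest ih =>
    simp only [buildLoop]
    by_cases h : String.ofList [c] ∈ rack
    · rw [if_pos h, removeListElement_eq_erase _ _ h, ih]
      have h1 : 1 ≤ rack.count (String.ofList [c]) := List.one_le_count_iff.mpr h
      constructor
      · intro H d
        have hd := H d
        by_cases hdc : d = c
        · subst hdc
          rw [List.count_erase_self] at hd
          simp only [List.count_cons_self]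
          omega
        · have hdc' : String.ofList [d] ≠ String.ofList [c] := by
            simp only [ne_eq, String.ofList_inj, List.cons.injEq, and_true]; exact hdc
          rw [List.count_erase_of_ne hdc'] at hd
          rw [List.count_cons, if_neg (by simp only [beq_iff_eq]; exact fun e => hdc (Eq.symm e)), add_zero]
          exact hd
      · intro H d
        have hd := H d
        by_cases hdc : d = c
        · subst hdc
          rw [List.count_erase_self]
          rw [List.count_cons_self] at hd
          omega
        · have hdc' : String.ofList [d] ≠ String.ofList [c] := by
            simp only [ne_eq, String.ofList_inj, List.cons.injEq, and_true]; exact hdc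
          rw [List.count_erase_of_ne hdc']
          rw [List.count_cons, if_neg (by simp only [beq_iff_eq]; exact fun e => hdc (Eq.symm e)), add_zero] at hd
          exact hd
    · rw [if_neg h]
      simp only [Bool.false_eq_true, false_iff]
      intro H
      have := H c
      rw [List.count_eq_zero_of_not_mem h, List.count_cons_self] at this
      omega

lemma pvCounts_eq (xs : List String) : pvCounts xs = PySem.Dict.counter xs :=
  PySem.Dict.foldl_insert_getD_add_one_eq_counter xs

lemma singleton_inj : Function.Injective (fun c : Char => String.ofList [c]) := by
  intro a b h
  simpa [String.ofList_inj] using h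

lemma altCond_iff (letters : List Char) (Rack : List String) :
    ((pvCounts (letters.map (fun c => String.ofList [c]))).items.all
        (fun p => (pvCounts Rack).getD p.1 0 ≥ p.2)) = true ↔
      ∀ c, letters.count c ≤ Rack.count (String.ofList [c]) := by
  rw [pvCounts_eq, pvCounts_eq, PySem.Dict.items_counter, List.all_eq_true]
  constructor
  · intro H c
    by_cases hc : c ∈ letters
    · have hmem : (String.ofList [c],
          ((letters.map (fun x => String.ofList [x])).count (String.ofList [c]) : Int))
          ∈ (PySem.Set.ofList (letters.map (fun x => String.ofList [x]))).map
              (fun k => (k, ((letters.map (fun x => String.ofList [x])).count k : Int))) :=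
        List.mem_map.mpr ⟨String.ofList [c],
          (PySem.Set.mem_ofList _ _).mpr (List.mem_map.mpr ⟨c, hc, rfl⟩), rfl⟩
      have h2 := of_decide_eq_true (H _ hmem)
      simp only [PySem.Dict.getD_counter, ge_iff_le] at h2
      rw [List.count_map_of_injective _ _ singleton_inj] at h2
      exact_mod_cast h2
    · rw [List.count_eq_zero_of_not_mem hc]; omega
  · intro H p hp
    rcases List.mem_map.mp hp with ⟨k, hk, rfl⟩
    rcases List.mem_map.mp ((PySem.Set.mem_ofList _ _).mp hk) with ⟨c, hc, rfl⟩
    apply decide_eq_true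
    simp only [PySem.Dict.getD_counter, ge_iff_le]
    rw [List.count_map_of_injective _ _ singleton_inj]
    exact_mod_cast H c

lemma cond_eq (word : String) (Rack : List String) :
    buildLoop word.toList Rack =
      ((pvCounts (word.toList.map (fun c => String.ofList [c]))).items.all
        (fun p => (pvCounts Rack).getD p.1 0 ≥ p.2)) := by
  rw [Bool.eq_iff_iff, buildLoop_iff, altCond_iff]

lemma fold_eq (Rack : List String) (ws : List String) (acc : List (String × Int))
    (hsc : ∀ w ∈ ws, wordScore w scrabbleScores =
      ((w.toList.map (fun c => String.ofList [c])).map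
        (fun s => (PySem.Dict.ofList scrabbleScores).getD s 0)).sum) :
    ws.foldl (fun scores word =>
      if buildLoop word.toList Rack then scores ++ [(word, wordScore word scrabbleScores)]
      else scores) acc
    = ws.foldl (fun scores word =>
      if ((pvCounts (word.toList.map (fun c => String.ofList [c]))).items.all
          (fun p => (pvCounts Rack).getD p.1 0 ≥ p.2)) then
        scores ++ [(word, ((word.toList.map (fun c => String.ofList [c])).map
          (fun s => (PySem.Dict.ofList scrabbleScores).getD s 0)).sum)]
      else scores) acc := by
  induction ws generalizing acc with
  | nil => rfl
  | cons w ws ih =>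
    simp only [List.foldl_cons]
    rw [cond_eq w Rack, hsc w (by simp)]
    exact ih _ (fun x hx => hsc x (by simp [hx]))

-- ===== VERDICT (by name: the statement is the Claim_ definition above) =====
theorem scoreList_spec : Claim_equal_scoreList := by
  intro Rack _
  show scoreList Rack = scoreList_alt Rack
  simp only [scoreList, scoreList_alt]
  exact fold_eq Rack Dictionary [] (by intro w hw; fin_cases hw <;> decide)
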